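-- pv_equiv track=rewrite | github.com/EricPWilliamson/Codewars-algorithms | Solutions/immortal_clean_cw.py | next_biggest
-- ===== SOURCE A (Python) =====
-- def row_sum(d, subd, i, j, l):
--     # Returns the sum of one row of a piece of [d]
--     if subd == 1:
--         return max([(i ^ j) + d - l, 0])
--     idx = i ^ j
--     d2 = d + subd - 1
--     # Calc sum of sequence from (d+idx*subd-l):(d2+idx*subd-l)
--     low = max([(d + idx * subd - l - 1), 0])
--     high = max([(d2 + idx * subd - l), 0])
--     return high * (high + 1) // 2 - low * (low + 1) // 2
--
-- def next_biggest(d, l, r, c, i, j):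
--     #The square [d] can be broken down into 2**n x 2**n pieces. Goes through [d] and takes the biggest pieces that are
--     #  covered by our range
--     ex_sum = 0
--     while r > 0 and c > 0:
--         if c >= r:
--             max_bxb = c.bit_length() - 1
--             subd = 2 ** max_bxb
--             if r <= subd:
--                 ex_sum += row_sum(d, subd, i // subd, j // subd, l) * r
--             else:
--                 ex_sum += row_sum(d, subd, i // subd, j // subd, l) * subd
--                 ex_sum += next_biggest(d, l, r - subd, subd, i + subd, j)
--             c -= subd
--             j += subd
--         else:
--             max_bxb = r.bit_length() - 1
--             subd = 2 ** max_bxb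
--             if c <= subd:
--                 ex_sum += row_sum(d, subd, i // subd, j // subd, l) * c
--             else:
--                 ex_sum += row_sum(d, subd, i // subd, j // subd, l) * subd
--                 ex_sum += next_biggest(d, l, subd, c - subd, i, j + subd)
--             r -= subd
--             i += subd
--     return ex_sum
-- ===== SOURCE B (Python) =====
-- def _block_sum(d, l, s, ib, jb):
--     # sum over t in 0..s-1 of max((ib ^ jb)*s + t + d - l, 0),
--     # computed by counting the clamped-to-zero prefix and summing the rest directly
--     base = (ib ^ jb) * s + d - l
--     k = max(-base, 0)
--     if k > s:
--         k = s
--     n = s - k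
--     return n * (base + k) + n * (n - 1) // 2
--
-- def next_biggest(d, l, r, c, i, j):
--     # iterative worklist traversal of the same power-of-2 block decomposition
--     total = 0
--     work = [(r, c, i, j)]
--     while work:
--         r0, c0, i0, j0 = work.pop()
--         if r0 <= 0 or c0 <= 0:
--             continue
--         if c0 >= r0:
--             s = 1 << (c0.bit_length() - 1)
--             mult = r0 if r0 <= s else s
--             total += _block_sum(d, l, s, i0 // s, j0 // s) * mult
--             if r0 > s:
--                 work.append((r0 - s, s, i0 + s, j0))
--             work.append((r0, c0 - s, i0, j0 + s))
--         else:
--             s = 1 << (r0.bit_length() - 1)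
--             mult = c0 if c0 <= s else s
--             total += _block_sum(d, l, s, i0 // s, j0 // s) * mult
--             if c0 > s:
--                 work.append((s, c0 - s, i0, j0 + s))
--             work.append((r0 - s, c0, i0 + s, j0))
--     return total
-- ===== Notes on version B (the rewrite author's own statement) =====
-- stated objective: alternative
-- what changed: B replaces A's while-loop-plus-recursion with a single iterative worklist (explicit stack) over the same power-of-2 block decomposition, and replaces A's difference-of-clamped-triangular-numbers row formula with a count-the-zero-terms plus direct arithmetic-series sum.
import Mathlib
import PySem

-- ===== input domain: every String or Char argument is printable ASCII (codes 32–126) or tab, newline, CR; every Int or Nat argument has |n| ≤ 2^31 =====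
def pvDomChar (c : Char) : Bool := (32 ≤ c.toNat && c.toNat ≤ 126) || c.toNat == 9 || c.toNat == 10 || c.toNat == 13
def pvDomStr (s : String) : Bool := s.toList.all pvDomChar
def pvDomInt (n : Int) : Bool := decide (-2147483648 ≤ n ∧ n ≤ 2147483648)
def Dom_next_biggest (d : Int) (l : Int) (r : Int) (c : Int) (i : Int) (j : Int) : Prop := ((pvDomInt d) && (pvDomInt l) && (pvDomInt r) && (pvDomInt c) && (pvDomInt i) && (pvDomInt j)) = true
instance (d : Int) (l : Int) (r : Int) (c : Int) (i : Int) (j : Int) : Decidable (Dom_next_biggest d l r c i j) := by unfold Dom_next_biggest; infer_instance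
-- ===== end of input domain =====

-- B replaces A's while-loop-plus-recursion with a single iterative worklist over the same
-- power-of-2 block decomposition, and a different per-row closed form (zero-term count plus
-- direct arithmetic series instead of a difference of clamped triangular numbers);
-- objective: alternative (same values, similar cost).

-- ===== PORT A =====
def row_sum (d : Int) (subd : Int) (i : Int) (j : Int) (l : Int) : Int :=
  if subd = 1 then max ((PySem.Int.bxor i j) + d - l) 0
  else
    let idx := PySem.Int.bxor i j
    let d2 := d + subd - 1
    let low := max (d + idx * subd - l - 1) 0
    let high := max (d2 + idx * subd - l) 0
    PySem.Int.floordiv (high * (high + 1)) 2 - PySem.Int.floordiv (low * (low + 1)) 2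

-- A's while loop is ported as the tail of the same recursion: each iteration only
-- shrinks (r,c), shifts (i,j) and adds to ex_sum, so continuing the loop is a call
-- on the updated state.
def next_biggest (d : Int) (l : Int) (r : Int) (c : Int) (i : Int) (j : Int) : Int :=
  if h : 0 < r ∧ 0 < c then
    if c ≥ r then
      let subd : Int := 2 ^ (PySem.Int.bitLength c - 1)
      (if r ≤ subd then
        row_sum d subd (PySem.Int.floordiv i subd) (PySem.Int.floordiv j subd) l * r
       else
        row_sum d subd (PySem.Int.floordiv i subd) (PySem.Int.floordiv j subd) l * subd
          + next_biggest d l (r - subd) subd (i + subd) j)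
      + next_biggest d l r (c - subd) i (j + subd)
    else
      let subd : Int := 2 ^ (PySem.Int.bitLength r - 1)
      (if c ≤ subd then
        row_sum d subd (PySem.Int.floordiv i subd) (PySem.Int.floordiv j subd) l * c
       else
        row_sum d subd (PySem.Int.floordiv i subd) (PySem.Int.floordiv j subd) l * subd
          + next_biggest d l subd (c - subd) i (j + subd))
      + next_biggest d l (r - subd) c (i + subd) j
  else 0
termination_by (r + c).toNat
decreasing_by
  · have := pow_pos (show (0:Int) < 2 by norm_num) (PySem.Int.bitLength c - 1); omega
  · have := pow_pos (show (0:Int) < 2 by norm_num) (PySem.Int.bitLength c - 1); omega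
  · have := pow_pos (show (0:Int) < 2 by norm_num) (PySem.Int.bitLength r - 1); omega
  · have := pow_pos (show (0:Int) < 2 by norm_num) (PySem.Int.bitLength r - 1); omega

-- ===== PORT B =====
def block_sum (d : Int) (l : Int) (s : Int) (ib : Int) (jb : Int) : Int :=
  let base := (PySem.Int.bxor ib jb) * s + d - l
  let k := min (max (-base) 0) s
  let n := s - k
  n * (base + k) + PySem.Int.floordiv (n * (n - 1)) 2

-- termination measure for the worklist: Σ 3^(c+r) over the stacked rectangles
def pvMeas (st : List (Int × Int × Int × Int)) : Nat :=
  (st.map (fun e => 3 ^ (e.2.1 + e.1).toNat)).sum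

-- measure-decrease facts cited by runWork's decreasing_by
theorem pvMeas_lt_skip (m R : Nat) : R < 3 ^ m + R :=
  Nat.lt_add_of_pos_left (pow_pos (by norm_num) m)

theorem pvMeas_lt_one (b m R : Nat) (hb : b < m) : 3 ^ b + R < 3 ^ m + R := by
  have := Nat.pow_lt_pow_right (show 1 < 3 by norm_num) hb; omega

theorem pvMeas_lt_two (a b m R : Nat) (ha : a < m) (hb : b < m) :
    3 ^ a + (3 ^ b + R) < 3 ^ m + R := by
  have h1 : 3 ^ a ≤ 3 ^ (m - 1) := Nat.pow_le_pow_right (by norm_num) (by omega)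
  have h2 : 3 ^ b ≤ 3 ^ (m - 1) := Nat.pow_le_pow_right (by norm_num) (by omega)
  have h3 : 3 ^ (m - 1) * 3 = 3 ^ m := by
    rw [← pow_succ]; congr 1; omega
  have h4 : 1 ≤ 3 ^ (m - 1) := Nat.one_le_pow _ _ (by norm_num)
  omega

-- the chosen power-of-2 block fits inside the side it was taken from
theorem pvSub_le (x : Int) (hx : 0 < x) : (2:Int) ^ (PySem.Int.bitLength x - 1) ≤ x := by
  have h := PySem.Int.two_pow_bitLength_le x (by omega)
  have h' : ((2 ^ (PySem.Int.bitLength x - 1) : Nat) : Int) ≤ (x.natAbs : Int) := by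
    exact_mod_cast h
  rw [Int.natAbs_of_nonneg (le_of_lt hx)] at h'
  push_cast at h'
  exact h'

-- worklist loop of B (Python `while work: ... work.pop()`; list head = stack top;
-- Python's local variables s/mult/total are written inline)
def runWork (d : Int) (l : Int) (st : List (Int × Int × Int × Int)) (total : Int) : Int :=
  match st with
  | [] => total
  | (r0, c0, i0, j0) :: rest =>
    if r0 ≤ 0 ∨ c0 ≤ 0 then runWork d l rest total
    else if c0 ≥ r0 then
      runWork d l
        ((r0, c0 - 2 ^ (PySem.Int.bitLength c0 - 1), i0, j0 + 2 ^ (PySem.Int.bitLength c0 - 1)) ::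
          ((if 2 ^ (PySem.Int.bitLength c0 - 1) < r0 then
              [((r0 - 2 ^ (PySem.Int.bitLength c0 - 1) : Int), 2 ^ (PySem.Int.bitLength c0 - 1),
                i0 + 2 ^ (PySem.Int.bitLength c0 - 1), j0)]
            else []) ++ rest))
        (total + block_sum d l (2 ^ (PySem.Int.bitLength c0 - 1))
            (PySem.Int.floordiv i0 (2 ^ (PySem.Int.bitLength c0 - 1)))
            (PySem.Int.floordiv j0 (2 ^ (PySem.Int.bitLength c0 - 1)))
          * (if r0 ≤ 2 ^ (PySem.Int.bitLength c0 - 1) then r0 else 2 ^ (PySem.Int.bitLength c0 - 1)))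
    else
      runWork d l
        (((r0 - 2 ^ (PySem.Int.bitLength r0 - 1) : Int), c0, i0 + 2 ^ (PySem.Int.bitLength r0 - 1), j0) ::
          ((if 2 ^ (PySem.Int.bitLength r0 - 1) < c0 then
              [((2 ^ (PySem.Int.bitLength r0 - 1) : Int), c0 - 2 ^ (PySem.Int.bitLength r0 - 1),
                i0, j0 + 2 ^ (PySem.Int.bitLength r0 - 1))]
            else []) ++ rest))
        (total + block_sum d l (2 ^ (PySem.Int.bitLength r0 - 1))
            (PySem.Int.floordiv i0 (2 ^ (PySem.Int.bitLength r0 - 1)))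
            (PySem.Int.floordiv j0 (2 ^ (PySem.Int.bitLength r0 - 1)))
          * (if c0 ≤ 2 ^ (PySem.Int.bitLength r0 - 1) then c0 else 2 ^ (PySem.Int.bitLength r0 - 1)))
termination_by pvMeas st
decreasing_by
  · exact pvMeas_lt_skip _ _
  · have hs1 := pow_pos (show (0:Int) < 2 by norm_num) (PySem.Int.bitLength c0 - 1)
    have hs2 := pvSub_le c0 (by omega)
    simp only [pvMeas, List.map_cons, List.map_append, List.sum_cons, List.sum_append]
    split_ifs with hlt
    · simp only [List.map_cons, List.map_nil, List.sum_cons, List.sum_nil, add_zero]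
      apply pvMeas_lt_two <;> omega
    · simp only [List.map_nil, List.sum_nil, Nat.zero_add]
      apply pvMeas_lt_one <;> omega
  · have hs1 := pow_pos (show (0:Int) < 2 by norm_num) (PySem.Int.bitLength r0 - 1)
    have hs2 := pvSub_le r0 (by omega)
    simp only [pvMeas, List.map_cons, List.map_append, List.sum_cons, List.sum_append]
    split_ifs with hlt
    · simp only [List.map_cons, List.map_nil, List.sum_cons, List.sum_nil, add_zero]
      apply pvMeas_lt_two <;> omega
    · simp only [List.map_nil, List.sum_nil, Nat.zero_add]
      apply pvMeas_lt_one <;> omega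

def next_biggest_alt (d : Int) (l : Int) (r : Int) (c : Int) (i : Int) (j : Int) : Int :=
  runWork d l [(r, c, i, j)] 0

-- ===== PRECONDITION & SPEC =====
def Spec_next_biggest (d : Int) (l : Int) (r : Int) (c : Int) (i : Int) (j : Int) (out : Int) : Prop := out = next_biggest_alt d l r c i j
instance (d : Int) (l : Int) (r : Int) (c : Int) (i : Int) (j : Int) (out : Int) : Decidable (Spec_next_biggest d l r c i j out) := by unfold Spec_next_biggest; infer_instance

-- ===== CLAIM (what is proved, stated in full; the proofs are below) =====
def Claim_equal_next_biggest : Prop := ∀ (d : Int) (l : Int) (r : Int) (c : Int) (i : Int) (j : Int), Dom_next_biggest d l r c i j → Spec_next_biggest d l r c i j (next_biggest d l r c i j)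

-- ===== LEMMAS AND PROOFS =====

theorem pvFdSelf (x : Int) : PySem.Int.floordiv (x + x) 2 = x := by
  rw [PySem.Int.floordiv_eq_ediv_of_pos (by norm_num)]; omega

-- Σ_{t=0}^{s-1} max(b+t,0), once as A's difference of clamped triangular numbers,
-- once as B's zero-count-plus-series form: the two closed forms agree.
theorem clamped_series (b s : Int) (hs : 1 ≤ s) :
    PySem.Int.floordiv (max (b + s - 1) 0 * (max (b + s - 1) 0 + 1)) 2
      - PySem.Int.floordiv (max (b - 1) 0 * (max (b - 1) 0 + 1)) 2
    = (s - min (max (-b) 0) s) * (b + min (max (-b) 0) s)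
      + PySem.Int.floordiv ((s - min (max (-b) 0) s) * ((s - min (max (-b) 0) s) - 1)) 2 := by
  rcases le_or_gt 1 b with hb | hb
  · have hk : min (max (-b) 0) s = 0 := by omega
    have h1 : max (b - 1) 0 = b - 1 := by omega
    have h2 : max (b + s - 1) 0 = b + s - 1 := by omega
    rw [hk, h1, h2]
    obtain ⟨x, hx⟩ := Int.even_mul_succ_self (b + s - 1)
    obtain ⟨y, hy⟩ := Int.even_mul_succ_self (b - 1)
    obtain ⟨z, hz⟩ := Int.even_mul_succ_self (s - 1)
    have hx' : (b + s - 1) * (b + s - 1 + 1) = x + x := hx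
    have hy' : (b - 1) * (b - 1 + 1) = y + y := hy
    have hz' : (s - 0) * (s - 0 - 1) = z + z := by linear_combination hz
    rw [hx', hy', hz', pvFdSelf, pvFdSelf, pvFdSelf]
    have key : x + x - (y + y) - (z + z) = 2 * (s * b) := by
      linear_combination (-1 : Int) * hx' + hy' + hz'
    linarith
  · rcases lt_or_ge 0 (b + s) with hbs | hbs
    · have hk : min (max (-b) 0) s = -b := by omega
      have h1 : max (b - 1) 0 = 0 := by omega
      have h2 : max (b + s - 1) 0 = b + s - 1 := by omega
      rw [hk, h1, h2]
      obtain ⟨x, hx⟩ := Int.even_mul_succ_self (b + s - 1)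
      have hx' : (b + s - 1) * (b + s - 1 + 1) = x + x := hx
      have hx'' : (s - -b) * (s - -b - 1) = x + x := by linear_combination hx
      have h0 : (0:Int) * (0 + 1) = 0 + 0 := by norm_num
      rw [hx', h0, hx'', pvFdSelf, pvFdSelf]
      ring
    · have hk : min (max (-b) 0) s = s := by omega
      have h1 : max (b - 1) 0 = 0 := by omega
      have h2 : max (b + s - 1) 0 = 0 := by omega
      rw [hk, h1, h2]
      have h0 : (0:Int) * (0 + 1) = 0 + 0 := by norm_num
      have h0' : (s - s) * (s - s - 1) = 0 + 0 := by ring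
      rw [h0, h0', pvFdSelf]
      ring

theorem row_eq_block (d l s ib jb : Int) (hs : 1 ≤ s) :
    row_sum d s ib jb l = block_sum d l s ib jb := by
  simp only [row_sum, block_sum]
  set idx := PySem.Int.bxor ib jb with hidx
  by_cases h1 : s = 1
  · subst h1
    simp only [eq_self_iff_true, if_true, mul_one]
    set b := idx + d - l with hb
    rcases le_or_gt b 0 with hb0 | hb0
    · have hk : min (max (-b) 0) 1 = min (-b) 1 := by omega
      have hmax : max b 0 = 0 := by omega
      rcases eq_or_lt_of_le hb0 with hbe | hbl
      · have : min (max (-b) 0) 1 = 0 := by omega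
        rw [this, hmax]
        have h0 : (1 - 0 : Int) * (1 - 0 - 1) = 0 + 0 := by ring
        rw [h0, pvFdSelf]; linarith
      · have : min (max (-b) 0) 1 = 1 := by omega
        rw [this, hmax]
        have h0 : (1 - 1 : Int) * (1 - 1 - 1) = 0 + 0 := by ring
        rw [h0, pvFdSelf]; ring
    · have : min (max (-b) 0) 1 = 0 := by omega
      rw [this]
      have hmax : max b 0 = b := by omega
      rw [hmax]
      have h0 : (1 - 0 : Int) * (1 - 0 - 1) = 0 + 0 := by ring
      rw [h0, pvFdSelf]; ring
  · rw [if_neg h1]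
    have e1 : d + idx * s - l - 1 = idx * s + d - l - 1 := by ring
    have e2 : d + s - 1 + idx * s - l = idx * s + d - l + s - 1 := by ring
    rw [e1, e2]
    exact clamped_series (idx * s + d - l) s hs

theorem runWork_eq (d l : Int) (st : List (Int × Int × Int × Int)) (total : Int) :
    runWork d l st total =
      total + (st.map (fun e => next_biggest d l e.1 e.2.1 e.2.2.1 e.2.2.2)).sum := by
  fun_induction runWork d l st total with
  | case1 => simp
  | case2 total r0 c0 i0 j0 rest h ih =>
    simp only [List.map_cons, List.sum_cons]
    conv_rhs => rw [next_biggest.eq_def]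
    rw [dif_neg (by omega), ih]
    ring
  | case3 total r0 c0 i0 j0 rest h hc ih =>
    simp only [dite_eq_ite] at ih
    simp only [List.map_cons, List.sum_cons]
    conv_rhs => rw [next_biggest.eq_def]
    rw [dif_pos (by omega), if_pos hc]
    have hs1 := pow_pos (show (0:Int) < 2 by norm_num) (PySem.Int.bitLength c0 - 1)
    have hrow := row_eq_block d l (2 ^ (PySem.Int.bitLength c0 - 1))
      (PySem.Int.floordiv i0 (2 ^ (PySem.Int.bitLength c0 - 1)))
      (PySem.Int.floordiv j0 (2 ^ (PySem.Int.bitLength c0 - 1))) (by omega)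
    rw [ih]
    simp only [hrow, List.map_cons, List.map_append, List.sum_cons, List.sum_append,
      List.map_nil, List.sum_nil]
    split_ifs with hlt hle hle
    all_goals first
      | omega
      | (simp only [List.map_cons, List.map_nil, List.sum_cons, List.sum_nil,
            List.map_append, List.sum_append]
         ring)
  | case4 total r0 c0 i0 j0 rest h hc ih =>
    simp only [dite_eq_ite] at ih
    simp only [List.map_cons, List.sum_cons]
    conv_rhs => rw [next_biggest.eq_def]
    rw [dif_pos (by omega), if_neg hc]
    have hs1 := pow_pos (show (0:Int) < 2 by norm_num) (PySem.Int.bitLength r0 - 1)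
    have hrow := row_eq_block d l (2 ^ (PySem.Int.bitLength r0 - 1))
      (PySem.Int.floordiv i0 (2 ^ (PySem.Int.bitLength r0 - 1)))
      (PySem.Int.floordiv j0 (2 ^ (PySem.Int.bitLength r0 - 1))) (by omega)
    rw [ih]
    simp only [hrow, List.map_cons, List.map_append, List.sum_cons, List.sum_append,
      List.map_nil, List.sum_nil]
    split_ifs with hlt hle hle
    all_goals first
      | omega
      | (simp only [List.map_cons, List.map_nil, List.sum_cons, List.sum_nil,
            List.map_append, List.sum_append]
         ring)

-- ===== VERDICT (by name: the statement is the Claim_ definition above) =====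
theorem next_biggest_spec : Claim_equal_next_biggest := by
  intro d l r c i j _
  unfold Spec_next_biggest next_biggest_alt
  rw [runWork_eq]
  simp
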